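-- pv_equiv track=rewrite | github.com/BobbyRobillard/CodingChallenges | Searching/Graphs/DepthFirstSearch/DFS.py | dfs
-- ===== SOURCE A (Python) =====
-- from collections import deque
--
-- def dfs(adjacency_list, s):
--     """
--     DFS using a stack instead of
--     recursion
--     Complexity: O(v + e)
--     """
--     parents = dict()
--     stack = deque()
--     stack.append((None, s))
--     while len(stack) > 0:
--         parent, u = stack.pop()
--         if u in parents:
--             continue
--         parents[u] = parent
--         for v in adjacency_list[u]:
--             stack.append((u, v))
--     return parents
-- ===== SOURCE B (Python) =====
-- def dfs(adjacency_list, s):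
--     """
--     DFS by recursion instead of an
--     explicit stack
--     Complexity: O(v + e)
--     """
--     parents = dict()
--
--     def visit(parent, u):
--         if u in parents:
--             return
--         parents[u] = parent
--         for v in reversed(adjacency_list[u]):
--             visit(u, v)
--
--     visit(None, s)
--     return parents
-- ===== Notes on version B (the rewrite author's own statement) =====
-- stated objective: alternative
-- what changed: The explicit deque stack and while-loop are replaced by a recursive visit helper that records the parent and recurses over the neighbors in reverse order, reproducing the stack's LIFO visit order and parent map exactly.
import Mathlib
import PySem

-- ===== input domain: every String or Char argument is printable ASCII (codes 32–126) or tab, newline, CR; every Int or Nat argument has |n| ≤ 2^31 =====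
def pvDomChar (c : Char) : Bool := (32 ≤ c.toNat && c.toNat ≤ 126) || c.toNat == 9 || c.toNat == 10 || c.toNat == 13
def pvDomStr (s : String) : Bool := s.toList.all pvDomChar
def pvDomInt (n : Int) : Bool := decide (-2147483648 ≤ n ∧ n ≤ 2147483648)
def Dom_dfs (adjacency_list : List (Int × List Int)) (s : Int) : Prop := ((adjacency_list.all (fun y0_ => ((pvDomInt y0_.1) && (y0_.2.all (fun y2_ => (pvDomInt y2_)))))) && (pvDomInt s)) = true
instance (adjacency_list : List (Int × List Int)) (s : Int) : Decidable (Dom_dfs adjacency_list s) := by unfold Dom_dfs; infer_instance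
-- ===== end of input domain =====

-- B replaces A's explicit deque stack by a recursive visit helper iterating neighbors in reverse; same traversal, same parent map.


-- dict lookup `adjacency_list[u]` (first match in the association list; none = KeyError)
def pyAdjGet (adj : List (Int × List Int)) (u : Int) : Option (List Int) :=
  (adj.find? (fun pr => pr.1 == u)).map Prod.snd

-- number of adjacency keys not yet in `parents` (termination measure for both ports)
def unvis (adj : List (Int × List Int)) (p : PySem.Dict Int (Option Int)) : Nat :=
  ((adj.map Prod.fst).toFinset.filter (fun k => p.contains k = false)).card

theorem mem_keys_of_pyAdjGet_some {adj : List (Int × List Int)} {u : Int} {vs : List Int}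
    (h : pyAdjGet adj u = some vs) : u ∈ adj.map Prod.fst := by
  unfold pyAdjGet at h
  cases hf : adj.find? (fun pr => pr.1 == u) with
  | none => simp [hf] at h
  | some pr =>
    have hm := List.mem_of_find?_eq_some hf
    have hp := List.find?_some hf
    simp only [beq_iff_eq] at hp
    exact List.mem_map.2 ⟨pr, hm, hp⟩

theorem unvis_insert_lt (adj : List (Int × List Int)) (p : PySem.Dict Int (Option Int))
    (u : Int) (a : Option Int) (vs : List Int)
    (hk : pyAdjGet adj u = some vs) (hc : p.contains u = false) :
    unvis adj (p.insert u a) < unvis adj p := by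
  apply Finset.card_lt_card
  constructor
  · intro k hk'
    simp only [Finset.mem_filter, PySem.Dict.contains_insert] at hk' ⊢
    rcases hk' with ⟨hm, hcc⟩
    simp only [Bool.or_eq_false_iff] at hcc
    exact ⟨hm, hcc.2⟩
  · intro hsub
    have hu : u ∈ (adj.map Prod.fst).toFinset.filter (fun k => p.contains k = false) := by
      simp only [Finset.mem_filter, List.mem_toFinset]
      exact ⟨mem_keys_of_pyAdjGet_some hk, hc⟩
    have := hsub hu
    simp only [Finset.mem_filter, PySem.Dict.contains_insert] at this
    simp at this

-- ===== PORT A =====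
-- A's while-loop over the deque stack (list head = top of the stack; pushing the
-- neighbors in order then makes the reversed neighbor list the new stack front).
def dfsLoop (adj : List (Int × List Int)) (p : PySem.Dict Int (Option Int))
    (st : List (Option Int × Int)) : PySem.Dict Int (Option Int) :=
  match st with
  | [] => p
  | (parent, u) :: rest =>
    if p.contains u then dfsLoop adj p rest
    else
      match h2 : pyAdjGet adj u with
      | none => p.insert u parent  -- Python raises KeyError here (excluded by Pre_)
      | some vs =>
        dfsLoop adj (p.insert u parent) ((vs.map (fun v => ((some u : Option Int), v))).reverse ++ rest)
termination_by (unvis adj p, st.length)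
decreasing_by
  · exact Prod.Lex.right _ (by simp)
  · exact Prod.Lex.left _ _ (unvis_insert_lt adj p u parent vs h2 (by simpa using ‹¬ p.contains u = true›))

def dfs (adjacency_list : List (Int × List Int)) (s : Int) : List (Int × Option Int) :=
  (dfsLoop adjacency_list PySem.Dict.empty [((none : Option Int), s)]).items

-- ===== PORT B =====
-- B's recursive visit; the fuel (strictly more than the number of distinct keys)
-- only bounds the recursion depth and is proved never to run out under Pre_.
def visitB (adj : List (Int × List Int)) : Nat → PySem.Dict Int (Option Int) → Option Int → Int →
    PySem.Dict Int (Option Int)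
  | 0, p, _, _ => p
  | f + 1, p, parent, u =>
    if p.contains u then p
    else
      let p' := p.insert u parent
      match pyAdjGet adj u with
      | none => p'  -- Python raises KeyError here (excluded by Pre_)
      | some vs => vs.reverse.foldl (fun q v => visitB adj f q (some u) v) p'

def dfs_alt (adjacency_list : List (Int × List Int)) (s : Int) : List (Int × Option Int) :=
  (visitB adjacency_list (adjacency_list.length + 1) PySem.Dict.empty (none : Option Int) s).items

-- ===== PRECONDITION & SPEC =====
-- Pre_: some set K of adjacency keys contains s and is closed under the listed edges —
-- i.e. every node reachable from s is a key of the dict; otherwise A raises KeyError.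
def Pre_dfs (adjacency_list : List (Int × List Int)) (s : Int) : Prop :=
  ∃ K ∈ ((adjacency_list.map Prod.fst).toFinset).powerset,
    s ∈ K ∧ ∀ u ∈ K, ∀ v ∈ (pyAdjGet adjacency_list u).getD [], v ∈ K
instance (adjacency_list : List (Int × List Int)) (s : Int) : Decidable (Pre_dfs adjacency_list s) := by
  unfold Pre_dfs; infer_instance

def pvWitness_dfs : (List (Int × List Int)) × Int :=
  ([(0, [1, 2]), (1, [2]), (2, [0, 1])], 0)

def Spec_dfs (adjacency_list : List (Int × List Int)) (s : Int) (out : List (Int × Option Int)) : Prop := out = dfs_alt adjacency_list s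
instance (adjacency_list : List (Int × List Int)) (s : Int) (out : List (Int × Option Int)) : Decidable (Spec_dfs adjacency_list s out) := by unfold Spec_dfs; infer_instance

-- ===== CLAIM (what is proved, stated in full; the proofs are below) =====
def Claim_equal_dfs : Prop := ∀ (adjacency_list : List (Int × List Int)) (s : Int), Dom_dfs adjacency_list s → Pre_dfs adjacency_list s → Spec_dfs adjacency_list s (dfs adjacency_list s)

-- ===== LEMMAS AND PROOFS =====

theorem unvis_insert_le (adj : List (Int × List Int)) (p : PySem.Dict Int (Option Int))
    (u : Int) (a : Option Int) : unvis adj (p.insert u a) ≤ unvis adj p := by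
  apply Finset.card_le_card
  intro k hk
  simp only [Finset.mem_filter, PySem.Dict.contains_insert] at hk ⊢
  rcases hk with ⟨hm, hc⟩
  simp only [Bool.or_eq_false_iff] at hc
  exact ⟨hm, hc.2⟩

theorem unvis_pos (adj : List (Int × List Int)) (p : PySem.Dict Int (Option Int))
    (u : Int) (vs : List Int)
    (hk : pyAdjGet adj u = some vs) (hc : p.contains u = false) : 1 ≤ unvis adj p := by
  have hu : u ∈ (adj.map Prod.fst).toFinset.filter (fun k => p.contains k = false) := by
    simp only [Finset.mem_filter, List.mem_toFinset]
    exact ⟨mem_keys_of_pyAdjGet_some hk, hc⟩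
  exact Finset.card_pos.2 ⟨u, hu⟩

-- unvis is non-increasing along any foldl whose step is non-increasing
theorem foldl_unvis_le (adj : List (Int × List Int)) (h : PySem.Dict Int (Option Int) → Int → PySem.Dict Int (Option Int))
    (hle : ∀ q v, unvis adj (h q v) ≤ unvis adj q) :
    ∀ (l : List Int) (q : PySem.Dict Int (Option Int)), unvis adj (l.foldl h q) ≤ unvis adj q := by
  intro l
  induction l with
  | nil => intro q; simp
  | cons v vs ih =>
    intro q
    calc unvis adj ((v :: vs).foldl h q) = unvis adj (vs.foldl h (h q v)) := rfl
      _ ≤ unvis adj (h q v) := ih _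
      _ ≤ unvis adj q := hle q v

theorem visitB_unvis_le (adj : List (Int × List Int)) :
    ∀ (f : Nat) (p : PySem.Dict Int (Option Int)) (a : Option Int) (u : Int),
      unvis adj (visitB adj f p a u) ≤ unvis adj p := by
  intro f
  induction f with
  | zero => intro p a u; simp [visitB]
  | succ f ih =>
    intro p a u
    simp only [visitB]
    split
    · exact le_rfl
    · cases hk : pyAdjGet adj u with
      | none => simp [unvis_insert_le]
      | some vs =>
        simp only
        calc unvis adj (vs.reverse.foldl (fun q v => visitB adj f q (some u) v) (p.insert u a))
            ≤ unvis adj (p.insert u a) := foldl_unvis_le adj _ (fun q v => ih q (some u) v) _ _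
          _ ≤ unvis adj p := unvis_insert_le adj p u a

-- foldl congruence under a preserved invariant
theorem foldl_congr_inv {σ α : Type} (I : σ → Prop) (h₁ h₂ : σ → α → σ)
    (hpres : ∀ s a, I s → I (h₁ s a)) (heq : ∀ s a, I s → h₁ s a = h₂ s a) :
    ∀ (l : List α) (s : σ), I s → l.foldl h₁ s = l.foldl h₂ s := by
  intro l
  induction l with
  | nil => intro s _; rfl
  | cons x xs ih =>
    intro s hs
    simp only [List.foldl_cons]
    rw [← heq s x hs]
    exact ih (h₁ s x) (hpres s x hs)

-- fuel irrelevance: any fuel strictly above unvis gives the same result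
theorem visitB_fuel_irrel (adj : List (Int × List Int)) :
    ∀ (n f g : Nat) (p : PySem.Dict Int (Option Int)) (a : Option Int) (u : Int),
      unvis adj p ≤ n → n < f → n < g → visitB adj f p a u = visitB adj g p a u := by
  intro n
  induction n with
  | zero =>
    intro f g p a u hle hf hg
    obtain ⟨f', rfl⟩ : ∃ f', f = f' + 1 := ⟨f - 1, by omega⟩
    obtain ⟨g', rfl⟩ : ∃ g', g = g' + 1 := ⟨g - 1, by omega⟩
    simp only [visitB]
    split
    · rfl
    · cases hk : pyAdjGet adj u with
      | none => rfl
      | some vs =>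
        exfalso
        have := unvis_pos adj p u vs hk (by simpa using ‹¬ p.contains u = true›)
        omega
  | succ n ih =>
    intro f g p a u hle hf hg
    obtain ⟨f', rfl⟩ : ∃ f', f = f' + 1 := ⟨f - 1, by omega⟩
    obtain ⟨g', rfl⟩ : ∃ g', g = g' + 1 := ⟨g - 1, by omega⟩
    simp only [visitB]
    split
    · rfl
    · cases hk : pyAdjGet adj u with
      | none => rfl
      | some vs =>
        simp only
        have hc : p.contains u = false := by simpa using ‹¬ p.contains u = true›
        have hlt : unvis adj (p.insert u a) < unvis adj p :=
          unvis_insert_lt adj p u a vs hk hc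
        apply foldl_congr_inv (fun q => unvis adj q ≤ n)
          (fun q v => visitB adj f' q (some u) v) (fun q v => visitB adj g' q (some u) v)
        · intro q v hq
          exact le_trans (visitB_unvis_le adj f' q (some u) v) hq
        · intro q v hq
          exact ih f' g' q (some u) v hq (by omega) (by omega)
        · omega

-- the stack invariant: every node on the stack lies in the closed key set K
def stInv (K : Finset Int) (st : List (Option Int × Int)) : Prop :=
  ∀ x ∈ st, x.2 ∈ K

theorem keyed_get_some {adj : List (Int × List Int)} {u : Int} {K : Finset Int}
    (hsub : K ⊆ (adj.map Prod.fst).toFinset) (hu : u ∈ K) :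
    ∃ vs, pyAdjGet adj u = some vs := by
  have hmem : u ∈ adj.map Prod.fst := List.mem_toFinset.1 (hsub hu)
  obtain ⟨pr, hpr, hfst⟩ := List.mem_map.1 hmem
  cases hk : pyAdjGet adj u with
  | none =>
    exfalso
    unfold pyAdjGet at hk
    rw [Option.map_eq_none_iff, List.find?_eq_none] at hk
    exact absurd (by simpa using hfst) (hk pr hpr)
  | some vs => exact ⟨vs, rfl⟩

-- main simulation: A's stack loop is B's visit folded over the stack
theorem dfsLoop_eq_foldl_visitB (adj : List (Int × List Int)) (K : Finset Int)
    (hsub : K ⊆ (adj.map Prod.fst).toFinset)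
    (hclosed : ∀ u ∈ K, ∀ v ∈ (pyAdjGet adj u).getD [], v ∈ K) :
    ∀ (n : Nat) (st : List (Option Int × Int)) (p : PySem.Dict Int (Option Int)) (f : Nat),
      unvis adj p ≤ n → n < f → stInv K st →
      dfsLoop adj p st = st.foldl (fun q x => visitB adj f q x.1 x.2) p := by
  intro n
  induction n with
  | zero =>
    intro st
    induction st with
    | nil => intro p f _ _ _; simp [dfsLoop]
    | cons x rest ih =>
      intro p f hle hf hinv
      obtain ⟨a, u⟩ := x
      obtain ⟨f', rfl⟩ : ∃ f', f = f' + 1 := ⟨f - 1, by omega⟩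
      by_cases hc : p.contains u = true
      · rw [dfsLoop, if_pos hc]
        simp only [List.foldl_cons, visitB, hc, if_pos]
        exact ih p (f' + 1) hle hf (fun x hx => hinv x (List.mem_cons_of_mem _ hx))
      · obtain ⟨vs, hk⟩ := keyed_get_some hsub (hinv (a, u) (List.mem_cons_self))
        exfalso
        have := unvis_pos adj p u vs hk (by simpa using hc)
        omega
  | succ n ih =>
    intro st
    induction st with
    | nil => intro p f _ _ _; simp [dfsLoop]
    | cons x rest ihst =>
      intro p f hle hf hinv
      obtain ⟨a, u⟩ := x
      obtain ⟨f', rfl⟩ : ∃ f', f = f' + 1 := ⟨f - 1, by omega⟩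
      have hinvrest : stInv K rest := fun x hx => hinv x (List.mem_cons_of_mem _ hx)
      by_cases hc : p.contains u = true
      · rw [dfsLoop, if_pos hc]
        simp only [List.foldl_cons, visitB, hc, if_pos]
        exact ihst p (f' + 1) hle hf hinvrest
      · obtain ⟨vs, hk⟩ := keyed_get_some hsub (hinv (a, u) (List.mem_cons_self))
        have hcf : p.contains u = false := by simpa using hc
        rw [dfsLoop, if_neg hc]
        rw [hk]
        have hlt : unvis adj (p.insert u a) < unvis adj p := unvis_insert_lt adj p u a vs hk hcf
        have hpos : 1 ≤ unvis adj p := unvis_pos adj p u vs hk hcf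
        have hinv' : stInv K ((vs.map (fun v => ((some u : Option Int), v))).reverse ++ rest) := by
          intro x hx
          rcases List.mem_append.1 hx with hx | hx
          · rw [List.mem_reverse] at hx
            obtain ⟨v, hv, rfl⟩ := List.mem_map.1 hx
            have := hclosed u (hinv (a, u) (List.mem_cons_self)) v
            rw [hk] at this
            exact this (by simpa using hv)
          · exact hinvrest x hx
        show dfsLoop adj (p.insert u a) ((vs.map (fun v => ((some u : Option Int), v))).reverse ++ rest) = _
        rw [ih _ (p.insert u a) (f' + 1) (by omega) (by omega) hinv']
        rw [List.foldl_append, List.foldl_cons]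
        -- the reversed pushed segment folds to the single visitB call on (a, u)
        have hv : visitB adj (f' + 1) p a u
            = vs.reverse.foldl (fun q v => visitB adj f' q (some u) v) (p.insert u a) := by
          rw [visitB, if_neg hc, hk]
        congr 1
        rw [hv, ← List.map_reverse, List.foldl_map]
        apply foldl_congr_inv (fun q => unvis adj q ≤ n)
          (fun q v => visitB adj (f' + 1) q (some u) v) (fun q v => visitB adj f' q (some u) v)
        · intro q v hq
          exact le_trans (visitB_unvis_le adj _ q (some u) v) hq
        · intro q v hq
          exact visitB_fuel_irrel adj n (f' + 1) f' q (some u) v hq (by omega) (by omega)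
        · omega

-- ===== VERDICT (by name: the statement is the Claim_ definition above) =====
theorem dfs_spec : Claim_equal_dfs := by
  intro adj s _ hpre
  obtain ⟨K, hKpow, hsK, hclosed⟩ := hpre
  have hsub : K ⊆ (adj.map Prod.fst).toFinset := Finset.mem_powerset.1 hKpow
  unfold Spec_dfs dfs dfs_alt
  have hbound : unvis adj PySem.Dict.empty ≤ adj.length := by
    unfold unvis
    calc ((adj.map Prod.fst).toFinset.filter _).card
        ≤ (adj.map Prod.fst).toFinset.card := Finset.card_filter_le _ _
      _ ≤ (adj.map Prod.fst).length := List.toFinset_card_le _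
      _ = adj.length := by simp
  have := dfsLoop_eq_foldl_visitB adj K hsub hclosed adj.length
      [((none : Option Int), s)] PySem.Dict.empty (adj.length + 1)
      hbound (by omega) (by intro x hx; simp at hx; subst hx; exact hsK)
  rw [this]
  rfl
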